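-- pv_equiv track=rewrite | github.com/matkow/CIS_Transcript_Generator | ml_termination/is_graduated.py | has_gen_eds
-- ===== SOURCE A (Python) =====
-- def has_gen_eds(course_list, completed_courses):
--         attributes = ["'GW'", "'GY'", "'GZ'", "'GA'", "'GB'", "'GD'", "'GG'", "'GU'"]
--         for attribute in attributes:
--                 attribute_complete = False
--                 for i in range(0, len(course_list[0])):
--                         if course_list[2][i].__contains__(attribute) and completed_courses.__contains__(course_list[0][i]):
--                                 attribute_complete = True
--                 if not attribute_complete:
--                         return False
--         return True
-- ===== SOURCE B (Python) =====
-- def has_gen_eds(course_list, completed_courses):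
--     attributes = ["'GW'", "'GY'", "'GZ'", "'GA'", "'GB'", "'GD'", "'GG'", "'GU'"]
--     satisfied = set()
--     for i in range(len(course_list[0])):
--         description = course_list[2][i]
--         if course_list[0][i] in completed_courses:
--             for attribute in attributes:
--                 if attribute in description:
--                     satisfied.add(attribute)
--     return all(a in satisfied for a in attributes)
-- ===== Notes on version B (the rewrite author's own statement) =====
-- stated objective: alternative
-- what changed: Inverts the loop nesting: one pass over the courses accumulating a set of satisfied attributes (checking completed-membership once per course), then a single all() membership check, instead of 8 separate full scans each with a per-attribute reset flag.
import Mathlib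
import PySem

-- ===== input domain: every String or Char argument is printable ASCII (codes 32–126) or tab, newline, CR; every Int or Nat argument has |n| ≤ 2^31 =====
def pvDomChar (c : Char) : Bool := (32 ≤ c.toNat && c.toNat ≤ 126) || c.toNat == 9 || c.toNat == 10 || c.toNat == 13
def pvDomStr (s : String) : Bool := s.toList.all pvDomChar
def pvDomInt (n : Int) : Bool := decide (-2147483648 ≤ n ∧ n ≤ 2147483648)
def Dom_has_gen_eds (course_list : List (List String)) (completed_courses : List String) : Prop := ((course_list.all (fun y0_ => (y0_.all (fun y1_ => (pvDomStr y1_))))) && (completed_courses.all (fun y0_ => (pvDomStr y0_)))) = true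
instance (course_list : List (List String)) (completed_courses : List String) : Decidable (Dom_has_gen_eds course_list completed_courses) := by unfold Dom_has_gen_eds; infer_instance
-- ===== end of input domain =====

-- B inverts A's loop nesting (one pass over courses building a set of satisfied
-- attributes, then one membership check) — alternative decomposition, same result.

-- the 8 gen-ed attrib strings, shared literal of both programs
def pvAttrs : List String := ["'GW'", "'GY'", "'GZ'", "'GA'", "'GB'", "'GD'", "'GG'", "'GU'"]

-- ===== PORT A =====
-- A's outer `for attrib in attributes` with its early `return False`
def pvGoA (course_list : List (List String)) (completed_courses : List String) : List String → Bool
  | [] => true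
  | attrib :: rest =>
    let attribute_complete :=
      (List.range (course_list.getD 0 []).length).foldl
        (fun acc i =>
          if PySem.Str.isIn attrib ((course_list.getD 2 []).getD i "") &&
             completed_courses.contains ((course_list.getD 0 []).getD i "") then true else acc)
        false
    if !attribute_complete then false
    else pvGoA course_list completed_courses rest

def has_gen_eds (course_list : List (List String)) (completed_courses : List String) : Bool :=
  pvGoA course_list completed_courses pvAttrs

-- ===== PORT B =====
def has_gen_eds_alt (course_list : List (List String)) (completed_courses : List String) : Bool :=
  let satisfied : PySem.Set String :=
    (List.range (course_list.getD 0 []).length).foldl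
      (fun s i =>
        let description := (course_list.getD 2 []).getD i ""
        if completed_courses.contains ((course_list.getD 0 []).getD i "") then
          pvAttrs.foldl
            (fun s attrib =>
              if PySem.Str.isIn attrib description then
                PySem.Set.add s attrib
              else s)
            s
        else s)
      PySem.Set.empty
  pvAttrs.all (fun a => PySem.Set.contains satisfied a)

-- ===== PRECONDITION & SPEC =====
-- Pre_ excludes exactly the inputs where A (and B alike) raises IndexError: course_list
-- empty, or course_list[0] nonempty while course_list lacks row 2 or row 2 is shorter
-- than row 0.
def Pre_has_gen_eds (course_list : List (List String)) (_completed_courses : List String) : Prop :=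
  course_list ≠ [] ∧
    (course_list.getD 0 [] = [] ∨
      (3 ≤ course_list.length ∧ (course_list.getD 0 []).length ≤ (course_list.getD 2 []).length))
instance (course_list : List (List String)) (completed_courses : List String) : Decidable (Pre_has_gen_eds course_list completed_courses) := by unfold Pre_has_gen_eds; infer_instance

def pvWitness_has_gen_eds : List (List String) × List String :=
  ([["c1"], ["t"], ["x'GW''GY''GZ''GA''GB''GD''GG''GU'"]], ["c1"])

def Spec_has_gen_eds (course_list : List (List String)) (completed_courses : List String) (out : Bool) : Prop := out = has_gen_eds_alt course_list completed_courses
instance (course_list : List (List String)) (completed_courses : List String) (out : Bool) : Decidable (Spec_has_gen_eds course_list completed_courses out) := by unfold Spec_has_gen_eds; infer_instance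

-- ===== CLAIM (what is proved, stated in full; the proofs are below) =====
def Claim_equal_has_gen_eds : Prop := ∀ (course_list : List (List String)) (completed_courses : List String), Dom_has_gen_eds course_list completed_courses → Pre_has_gen_eds course_list completed_courses → Spec_has_gen_eds course_list completed_courses (has_gen_eds course_list completed_courses)

-- ===== LEMMAS AND PROOFS =====

-- A's inner flag loop computes an `any` over the index range
theorem pv_foldl_if_or (p : Nat → Bool) (l : List Nat) (b : Bool) :
    l.foldl (fun acc i => if p i then true else acc) b = (b || l.any p) := by
  induction l generalizing b with
  | nil => simp
  | cons h t ih =>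
    rw [List.foldl_cons, ih]
    cases hp : p h <;> simp [hp]

-- characterisation of A's outer loop
theorem pv_goA_eq (cl : List (List String)) (cc : List String) (al : List String) :
    pvGoA cl cc al = al.all (fun a =>
      (List.range (cl.getD 0 []).length).any (fun i =>
        PySem.Str.isIn a ((cl.getD 2 []).getD i "") && cc.contains ((cl.getD 0 []).getD i ""))) := by
  induction al with
  | nil => simp [pvGoA]
  | cons a rest ih =>
    simp only [pvGoA, pv_foldl_if_or, Bool.false_or, ih, List.all_cons]
    cases ((List.range (cl.getD 0 []).length).any (fun i =>
        PySem.Str.isIn a ((cl.getD 2 []).getD i "") && cc.contains ((cl.getD 0 []).getD i ""))) <;> simp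

-- membership after B's inner attrib loop
theorem pv_mem_inner (al : List String) (r : String → Bool) (s : PySem.Set String) (a : String) :
    (a ∈ al.foldl (fun s x => if r x then PySem.Set.add s x else s) s) ↔
      a ∈ s ∨ (a ∈ al ∧ r a = true) := by
  induction al generalizing s with
  | nil => simp
  | cons h t ih =>
    rw [List.foldl_cons, ih]
    by_cases hr : r h = true
    · simp only [hr, if_true, PySem.Set.mem_add, List.mem_cons]
      constructor
      · rintro ((hs | rfl) | ⟨ht, hra⟩)
        · exact Or.inl hs
        · exact Or.inr ⟨Or.inl rfl, hr⟩
        · exact Or.inr ⟨Or.inr ht, hra⟩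
      · rintro (hs | ⟨(rfl | ht), hra⟩)
        · exact Or.inl (Or.inl hs)
        · exact Or.inl (Or.inr rfl)
        · exact Or.inr ⟨ht, hra⟩
    · simp only [hr, List.mem_cons]
      constructor
      · rintro (hs | ⟨ht, hra⟩)
        · exact Or.inl hs
        · exact Or.inr ⟨Or.inr ht, hra⟩
      · rintro (hs | ⟨(rfl | ht), hra⟩)
        · exact Or.inl hs
        · exact absurd hra hr
        · exact Or.inr ⟨ht, hra⟩

-- membership after B's outer course loop
theorem pv_mem_outer (l : List Nat) (q : Nat → Bool) (r : Nat → String → Bool)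
    (s : PySem.Set String) (a : String) :
    (a ∈ l.foldl (fun s i =>
        if q i then pvAttrs.foldl (fun s x => if r i x then PySem.Set.add s x else s) s else s) s) ↔
      a ∈ s ∨ ∃ i ∈ l, q i = true ∧ a ∈ pvAttrs ∧ r i a = true := by
  induction l generalizing s with
  | nil => simp
  | cons h t ih =>
    rw [List.foldl_cons, ih]
    by_cases hq : q h = true
    · simp only [hq, if_true, pv_mem_inner, List.mem_cons]
      constructor
      · rintro ((hs | ⟨hal, hra⟩) | ⟨i, hit, hqi, hal, hri⟩)
        · exact Or.inl hs
        · exact Or.inr ⟨h, Or.inl rfl, hq, hal, hra⟩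
        · exact Or.inr ⟨i, Or.inr hit, hqi, hal, hri⟩
      · rintro (hs | ⟨i, (rfl | hit), hqi, hal, hri⟩)
        · exact Or.inl (Or.inl hs)
        · exact Or.inl (Or.inr ⟨hal, hri⟩)
        · exact Or.inr ⟨i, hit, hqi, hal, hri⟩
    · simp only [hq, List.mem_cons]
      constructor
      · rintro (hs | ⟨i, hit, hqi, hal, hri⟩)
        · exact Or.inl hs
        · exact Or.inr ⟨i, Or.inr hit, hqi, hal, hri⟩
      · rintro (hs | ⟨i, (rfl | hit), hqi, hal, hri⟩)
        · exact Or.inl hs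
        · exact absurd hqi hq
        · exact Or.inr ⟨i, hit, hqi, hal, hri⟩

-- ===== VERDICT (by name: the statement is the Claim_ definition above) =====
theorem has_gen_eds_spec : Claim_equal_has_gen_eds := by
  intro cl cc _ _
  unfold Spec_has_gen_eds has_gen_eds has_gen_eds_alt
  rw [pv_goA_eq, Bool.eq_iff_iff]
  simp only [List.all_eq_true, List.any_eq_true, Bool.and_eq_true, List.mem_range,
    PySem.Set.contains_iff, pv_mem_outer, PySem.Set.empty, List.not_mem_nil, false_or]
  constructor
  · rintro H a ha
    obtain ⟨i, hin, h1, h2⟩ := H a ha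
    exact ⟨i, hin, h2, ha, h1⟩
  · rintro H a ha
    obtain ⟨i, hin, hq, -, hr⟩ := H a ha
    exact ⟨i, hin, hr, hq⟩
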